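-- pv_equiv track=rewrite | github.com/24B11CS207/Voice-assistant | assistant_core.py | _extract_weather_location
-- ===== SOURCE A (Python) =====
-- def _extract_weather_location(command: str) -> str:
--     """Extract a location from a weather-style query."""
--
--     normalized = command.strip().lower().replace("wheather", "weather")
--     patterns = [
--         "weather in",
--         "weather for",
--         "weather at",
--         "weather of",
--         "weather details in",
--         "weather details for",
--         "weather details at",
--         "tell me weather details in",
--         "tell me weather details for",
--         "tell me weather details at",
--         "show me weather details in",
--         "show me weather details for",
--         "show me weather details at",
--         "show weather in",
--         "show weather for",
--         "show weather at",
--         "tell me weather in",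
--         "tell me weather for",
--         "tell me weather at",
--         "what is the weather in",
--         "what is the weather for",
--         "what is the weather at",
--         "what's the weather in",
--         "what's the weather for",
--         "what's the weather at",
--         "weather",
--     ]
--
--     for pattern in patterns:
--         if normalized.startswith(pattern):
--             location = normalized.removeprefix(pattern).strip()
--             return location
--
--     return ""
-- ===== SOURCE B (Python) =====
-- def _extract_weather_location(command: str) -> str:
--     """Extract a location from a weather-style query (longest-matching-prefix version)."""
--
--     normalized = command.strip().lower().replace("wheather", "weather")
--     patterns = [
--         "weather in",
--         "weather for",
--         "weather at",
--         "weather of",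
--         "weather details in",
--         "weather details for",
--         "weather details at",
--         "tell me weather details in",
--         "tell me weather details for",
--         "tell me weather details at",
--         "show me weather details in",
--         "show me weather details for",
--         "show me weather details at",
--         "show weather in",
--         "show weather for",
--         "show weather at",
--         "tell me weather in",
--         "tell me weather for",
--         "tell me weather at",
--         "what is the weather in",
--         "what is the weather for",
--         "what is the weather at",
--         "what's the weather in",
--         "what's the weather for",
--         "what's the weather at",
--         "weather",
--     ]
--
--     best = None
--     for pattern in patterns:
--         if normalized.startswith(pattern) and (best is None or len(pattern) > len(best)):
--             best = pattern
--
--     if best is None: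
--         return ""
--     return normalized.removeprefix(best).strip()
-- ===== Notes on version B (the rewrite author's own statement) =====
-- stated objective: alternative
-- what changed: B replaces A's ordered early-return scan with a single longest-matching-prefix accumulator pass (keep the longest pattern that is a prefix, then strip the remainder once); equivalent because no listed pattern is a prefix of a later one, so the first ordered match is the unique longest match.
import Mathlib
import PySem

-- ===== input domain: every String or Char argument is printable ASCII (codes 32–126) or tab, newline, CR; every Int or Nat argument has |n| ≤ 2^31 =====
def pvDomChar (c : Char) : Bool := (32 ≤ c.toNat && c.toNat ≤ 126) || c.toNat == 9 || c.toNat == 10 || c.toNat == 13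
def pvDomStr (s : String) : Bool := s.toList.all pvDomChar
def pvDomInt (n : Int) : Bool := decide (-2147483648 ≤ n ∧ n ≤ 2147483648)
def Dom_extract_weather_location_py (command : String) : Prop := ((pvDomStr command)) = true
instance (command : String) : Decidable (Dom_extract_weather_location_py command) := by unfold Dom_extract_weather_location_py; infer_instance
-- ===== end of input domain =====

-- B replaces A's first-match early-return scan with a longest-matching-prefix accumulator pass
-- (objective: alternative decomposition; same cost).


-- ===== PORT A =====
-- the shared pattern-list constant (data, used verbatim by both Pythons)
def pvPatterns : List String :=
  [ "weather in", "weather for", "weather at", "weather of",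
    "weather details in", "weather details for", "weather details at",
    "tell me weather details in", "tell me weather details for", "tell me weather details at",
    "show me weather details in", "show me weather details for", "show me weather details at",
    "show weather in", "show weather for", "show weather at",
    "tell me weather in", "tell me weather for", "tell me weather at",
    "what is the weather in", "what is the weather for", "what is the weather at",
    "what's the weather in", "what's the weather for", "what's the weather at",
    "weather" ]

-- str.removeprefix(p): drop the prefix when present, else unchanged (exact; PySem has no removeprefix)
def pvRemoveprefix (s p : String) : String :=
  if PySem.Str.startswith s p then String.ofList (s.toList.drop p.toList.length) else s

-- A's normalization: command.strip().lower().replace("wheather", "weather")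
def pvNormalize (command : String) : String :=
  PySem.Str.replace (PySem.Str.lower (PySem.Str.strip command)) "wheather" "weather"

-- A's for-loop with early return
def pvLoopA (normalized : String) : List String → String
  | [] => ""
  | p :: rest =>
      if PySem.Str.startswith normalized p then
        PySem.Str.strip (pvRemoveprefix normalized p)
      else pvLoopA normalized rest

def extract_weather_location_py (command : String) : String :=
  pvLoopA (pvNormalize command) pvPatterns

-- ===== PORT B =====
-- one step of B's accumulator loop: keep the longest matching prefix seen so far
def pvStepB (normalized : String) (best : Option String) (p : String) : Option String :=
  if PySem.Str.startswith normalized p &&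
       (match best with
        | none => true
        | some b => decide (PySem.Str.len b < PySem.Str.len p)) then
    some p
  else best

def extract_weather_location_py_alt (command : String) : String :=
  let normalized := pvNormalize command
  match pvPatterns.foldl (pvStepB normalized) none with
  | none => ""
  | some b => PySem.Str.strip (pvRemoveprefix normalized b)

-- ===== PRECONDITION & SPEC =====
def Spec_extract_weather_location_py (command : String) (out : String) : Prop := out = extract_weather_location_py_alt command
instance (command : String) (out : String) : Decidable (Spec_extract_weather_location_py command out) := by unfold Spec_extract_weather_location_py; infer_instance

-- ===== CLAIM (what is proved, stated in full; the proofs are below) =====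
def Claim_equal_extract_weather_location_py : Prop := ∀ (command : String), Dom_extract_weather_location_py command → Spec_extract_weather_location_py command (extract_weather_location_py command)

-- ===== LEMMAS AND PROOFS =====

-- once the accumulator holds p and no later pattern beats it, the fold keeps p
lemma pvFoldl_keep (s p : String) (ps : List String)
    (h : ∀ q ∈ ps, pvStepB s (some p) q = some p) :
    ps.foldl (pvStepB s) (some p) = some p := by
  induction ps with
  | nil => rfl
  | cons q rest ih =>
      rw [List.foldl_cons, h q (List.mem_cons_self), ih (fun r hr => h r (List.mem_cons_of_mem q hr))]

-- first ordered match = longest match, given no earlier pattern is a prefix of a later one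
lemma pvLoop_eq_fold (s : String) (ps : List String)
    (hp : ps.Pairwise (fun p q => ¬ (p.toList <+: q.toList))) :
    pvLoopA s ps =
      match ps.foldl (pvStepB s) none with
      | none => ""
      | some b => PySem.Str.strip (pvRemoveprefix s b) := by
  induction ps with
  | nil => rfl
  | cons p rest ih =>
      rcases List.pairwise_cons.mp hp with ⟨hhead, htail⟩
      by_cases hs : PySem.Chars.startswith s.toList p.toList = true
      · have hstep : pvStepB s none p = some p := by simp [pvStepB, hs]
        have hkeep : rest.foldl (pvStepB s) (some p) = some p := by
          apply pvFoldl_keep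
          intro q hq
          by_cases hq' : PySem.Chars.startswith s.toList q.toList = true
          · have hps : p.toList <+: s.toList := (PySem.Chars.startswith_iff _ _).mp hs
            have hqs : q.toList <+: s.toList := (PySem.Chars.startswith_iff _ _).mp hq'
            have hqp : q.toList <+: p.toList := by
              rcases List.prefix_or_prefix_of_prefix hps hqs with h | h
              · exact absurd h (hhead q hq)
              · exact h
            have hlen : q.toList.length ≤ p.toList.length := hqp.length_le
            have e1 : p.toList.length = p.length := by simp
            have e2 : q.toList.length = q.length := by simp
            simp only [pvStepB, PySem.Str.startswith_eq, hq', Bool.true_and]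
            rw [if_neg]
            simp only [PySem.Str.len, decide_eq_true_eq, not_lt]
            omega
          · simp [pvStepB, hq']
        simp only [pvLoopA, PySem.Str.startswith_eq, hs, if_true, List.foldl_cons, hstep, hkeep]
      · have hstep : pvStepB s none p = none := by simp [pvStepB, hs]
        simp only [pvLoopA, PySem.Str.startswith_eq, hs, List.foldl_cons, hstep]
        exact ih htail

lemma pvPatterns_pairwise :
    pvPatterns.Pairwise (fun p q => ¬ (p.toList <+: q.toList)) := by decide

-- ===== VERDICT (by name: the statement is the Claim_ definition above) =====
theorem extract_weather_location_py_spec : Claim_equal_extract_weather_location_py := by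
  intro command _
  unfold Spec_extract_weather_location_py extract_weather_location_py extract_weather_location_py_alt
  exact pvLoop_eq_fold (pvNormalize command) pvPatterns pvPatterns_pairwise
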